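-- pv_equiv track=rewrite | github.com/MrBrantCode/unitest_baseline | mut_generate/mist_train_taco/taco_11346/solution.py | select_and_filter_numbers
-- ===== SOURCE A (Python) =====
-- def select_and_filter_numbers(n, array, m):
--     # Helper function to count the number of active elements in the array
--     def noofelement(array):
--         return sum(1 for i in range(len(array)) if array[i][1])
--
--     # Helper function to get the single remaining value
--     def getSingleValue(array):
--         for i in range(len(array)):
--             if array[i][1]:
--                 return array[i][0]
--
--     # Helper function to get all even numbers from the array
--     def getEven(array):
--         return sorted(array[i][0] for i in range(len(array)) if array[i][0] % 2 == 0)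
--
--     # Helper function to get all odd numbers from the array
--     def getOdd(array):
--         return sorted(array[i][0] for i in range(len(array)) if array[i][0] % 2 != 0)
--
--     # Initialize the array with active flags
--     a = [[array[i], True] for i in range(n)]
--
--     # Perform the deletion process until one element remains
--     loop = noofelement(a)
--     while loop > 1:
--         count = 0
--         i = 0
--         while i < m:
--             if not a[count][1]:
--                 count += 1
--                 if count >= len(a):
--                     count = 0
--                 continue
--             if i == (m - 1):
--                 a[count][1] = False
--             count += 1
--             if count >= len(a):
--                 count = 0
--             i += 1
--         loop = noofelement(a)
--
--     # Determine the last remaining number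
--     check = getSingleValue(a)
--
--     # Return the appropriate sorted list of numbers
--     if check % 2 == 0:
--         return getEven(a)
--     else:
--         return getOdd(a)
-- ===== SOURCE B (Python) =====
-- def select_and_filter_numbers(n, array, m):
--     elems = array[:n]
--     rem = list(elems)
--     while len(rem) > 1:
--         rem.pop((m - 1) % len(rem))
--     check = rem[0]
--     return sorted(x for x in elems if x % 2 == check % 2)
-- ===== Notes on version B (the rewrite author's own statement) =====
-- stated objective: faster
-- what changed: B drops the alive-flag array and the inner loop that counts m steps element-by-element (restarting from index 0 each round, skipping dead slots); instead it keeps only the surviving values in a list and pops index (m-1) % len once per round, computed directly with one modulo.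
import Mathlib
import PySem

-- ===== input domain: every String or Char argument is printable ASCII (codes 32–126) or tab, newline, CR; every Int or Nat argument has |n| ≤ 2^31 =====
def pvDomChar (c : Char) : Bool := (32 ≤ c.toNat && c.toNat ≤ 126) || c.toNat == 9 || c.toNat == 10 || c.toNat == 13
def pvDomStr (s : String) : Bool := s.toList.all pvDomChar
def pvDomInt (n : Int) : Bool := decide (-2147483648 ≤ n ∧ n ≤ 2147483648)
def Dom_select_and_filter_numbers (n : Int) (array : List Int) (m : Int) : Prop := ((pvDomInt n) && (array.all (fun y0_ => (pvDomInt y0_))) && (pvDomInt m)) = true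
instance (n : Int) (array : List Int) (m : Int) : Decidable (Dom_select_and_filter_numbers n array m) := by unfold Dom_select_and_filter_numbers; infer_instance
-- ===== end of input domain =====

-- B replaces A's flag-marking elimination (which walks the array m counting steps per round)
-- by popping index (m-1) % len from a shrinking list once per round; objective: faster.

-- ===== PORT A =====
-- sum(1 for i in range(len(array)) if array[i][1])
def noofelementA (a : List (Int × Bool)) : Int :=
  ((List.range a.length).countP (fun i => (a.getD i (0, false)).2) : Int)

-- first a[i][0] with a[i][1] set (None if no element is active)
def getSingleValueA (a : List (Int × Bool)) : Option Int :=
  (List.range a.length).findSome? (fun i => if (a.getD i (0, false)).2 then some (a.getD i (0, false)).1 else none)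

-- sorted(array[i][0] for i in range(len(array)) if array[i][0] % 2 == 0)
def getEvenA (a : List (Int × Bool)) : List Int :=
  PySem.List.sorted (((List.range a.length).filter (fun i => PySem.Int.mod (a.getD i (0, false)).1 2 == 0)).map (fun i => (a.getD i (0, false)).1)) (fun x => x) false

-- sorted(array[i][0] for i in range(len(array)) if array[i][0] % 2 != 0)
def getOddA (a : List (Int × Bool)) : List Int :=
  PySem.List.sorted (((List.range a.length).filter (fun i => !(PySem.Int.mod (a.getD i (0, false)).1 2 == 0))).map (fun i => (a.getD i (0, false)).1)) (fun x => x) false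

-- the inner 'while i < m' loop; the fuel only makes the recursion total (chosen large enough below)
def innerA (m : Int) : Nat → List (Int × Bool) → Int → Int → List (Int × Bool)
  | 0, a, _, _ => a
  | fuel + 1, a, count, i =>
    if i < m then
      if !(PySem.List.pyGetD a count ((0 : Int), false)).2 then
        innerA m fuel a (if count + 1 ≥ (a.length : Int) then 0 else count + 1) i
      else
        let a' := if i == m - 1 then PySem.List.pySetD a count ((PySem.List.pyGetD a count ((0 : Int), false)).1, false) else a
        innerA m fuel a' (if count + 1 ≥ (a'.length : Int) then 0 else count + 1) (i + 1)
    else a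

-- the outer 'while loop > 1' loop; fuel = number of elements suffices (each round kills one)
def outerA (m : Int) : Nat → List (Int × Bool) → List (Int × Bool)
  | 0, a => a
  | fuel + 1, a =>
    if noofelementA a > 1 then
      outerA m fuel (innerA m ((m.toNat + 1) * (a.length + 1)) a 0 0)
    else a

def select_and_filter_numbers (n : Int) (array : List Int) (m : Int) : List Int :=
  let a := (PySem.List.pyRange 0 n 1).map (fun i => (PySem.List.pyGetD array i 0, true))
  let afin := outerA m a.length a
  let check := (getSingleValueA afin).getD 0   -- Python's 'check % 2' raises on None; Pre_ gives n ≥ 1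
  if PySem.Int.mod check 2 == 0 then getEvenA afin else getOddA afin

-- ===== PORT B =====
-- while len(rem) > 1: rem.pop((m - 1) % len(rem))
def altLoopB (m : Int) (rem : List Int) : List Int :=
  if 1 < rem.length then
    match hp : PySem.List.pop? rem (PySem.Int.mod (m - 1) (rem.length : Int)) with
    | some r => altLoopB m r.2
    | none => rem   -- unreachable: the index is in range
  else rem
termination_by rem.length
decreasing_by
  have := PySem.List.length_of_pop?_eq_some _ hp; omega

def select_and_filter_numbers_alt (n : Int) (array : List Int) (m : Int) : List Int :=
  let elems := PySem.List.slice array none (some n)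
  let rem := altLoopB m elems
  let check := PySem.List.pyGetD rem 0 0   -- rem[0]; Pre_ gives n ≥ 1, so rem is nonempty
  PySem.List.sorted (elems.filter (fun x => PySem.Int.mod x 2 == PySem.Int.mod check 2)) (fun x => x) false

-- ===== PRECONDITION & SPEC =====
-- A raises IndexError when n > len(array), raises TypeError (None % 2) when n ≤ 0, and loops
-- forever when m ≤ 0 with two or more selected elements; exactly those inputs are excluded.
def Pre_select_and_filter_numbers (n : Int) (array : List Int) (m : Int) : Prop :=
  1 ≤ n ∧ n ≤ array.length ∧ (1 ≤ m ∨ n = 1)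
instance (n : Int) (array : List Int) (m : Int) : Decidable (Pre_select_and_filter_numbers n array m) := by unfold Pre_select_and_filter_numbers; infer_instance

def pvWitness_select_and_filter_numbers : Int × List Int × Int := (3, [4, 1, 2], 2)

def Spec_select_and_filter_numbers (n : Int) (array : List Int) (m : Int) (out : List Int) : Prop := out = select_and_filter_numbers_alt n array m
instance (n : Int) (array : List Int) (m : Int) (out : List Int) : Decidable (Spec_select_and_filter_numbers n array m out) := by unfold Spec_select_and_filter_numbers; infer_instance

-- ===== CLAIM (what is proved, stated in full; the proofs are below) =====
def Claim_equal_select_and_filter_numbers : Prop := ∀ (n : Int) (array : List Int) (m : Int), Dom_select_and_filter_numbers n array m → Pre_select_and_filter_numbers n array m → Spec_select_and_filter_numbers n array m (select_and_filter_numbers n array m)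

-- ===== LEMMAS AND PROOFS =====

-- abstract views of the A-side state
def kcnt (a : List (Int × Bool)) : Nat := (a.filter (·.2)).length
def aliveVals (a : List (Int × Bool)) : List Int := (a.filter (·.2)).map (·.1)
def alv (a : List (Int × Bool)) (j : Nat) : Bool := (a.getD j (0, false)).2
-- one full cyclic scan of the physical indices starting at c
def rotIdx (len c : Nat) : List Nat := (List.range len).drop c ++ (List.range len).take c
def alivesFrom (a : List (Int × Bool)) (c : Nat) : List Nat := (rotIdx a.length c).filter (alv a)
def distA (a : List (Int × Bool)) (c : Nat) : Nat := ((rotIdx a.length c).takeWhile (fun j => !(alv a j))).length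
def nxt (len c : Nat) : Nat := if c + 1 ≥ len then 0 else c + 1

lemma mod_pred (t k : Nat) (hk : 0 < k) (ht : 0 < t) :
    (t - 1) % k = if t % k = 0 then k - 1 else t % k - 1 := by
  have hq := (Nat.div_add_mod t k).symm
  have hlt : t % k < k := Nat.mod_lt _ hk
  split
  · rename_i h0
    have hq1 : 0 < t / k := by
      rcases Nat.eq_zero_or_pos (t / k) with h | h
      · rw [h] at hq; simp at hq; omega
      · exact h
    obtain ⟨q', hq'⟩ : ∃ q', t / k = q' + 1 := ⟨t / k - 1, by omega⟩
    rw [hq'] at hq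
    have hm : k * (q' + 1) = k * q' + k := by ring
    rw [hm] at hq
    have ht1 : t - 1 = (k - 1) + q' * k := by
      rw [Nat.mul_comm q' k]; omega
    rw [ht1, Nat.add_mul_mod_self_right, Nat.mod_eq_of_lt (by omega)]
  · rename_i h0
    have ht1 : t - 1 = (t % k - 1) + (t / k) * k := by
      rw [Nat.mul_comm (t / k) k]; omega
    rw [ht1, Nat.add_mul_mod_self_right, Nat.mod_eq_of_lt (by omega)]

lemma countP_range_getD {α : Type} (l : List α) (d : α) (p : α → Bool) :
    (List.range l.length).countP (fun i => p (l.getD i d)) = l.countP p := by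
  induction l with
  | nil => simp
  | cons x t ih =>
    rw [List.length_cons, List.range_succ_eq_map, List.countP_cons, List.countP_map, List.countP_cons]
    simp only [List.getD_cons_zero, Function.comp_def, Nat.succ_eq_add_one, List.getD_cons_succ]
    rw [ih]

lemma filter_map_range_getD {α β : Type} (l : List α) (d : α) (q : α → Bool) (f : α → β) :
    ((List.range l.length).filter (fun i => q (l.getD i d))).map (fun i => f (l.getD i d)) =
      (l.filter q).map f := by
  induction l with
  | nil => simp
  | cons x t ih =>
    rw [List.length_cons, List.range_succ_eq_map, List.filter_cons, List.filter_map, List.filter_cons]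
    simp only [List.getD_cons_zero, Function.comp_def, Nat.succ_eq_add_one, List.getD_cons_succ]
    cases hx : q x <;>
      simp only [if_pos, Bool.false_eq_true, ite_false, List.map_cons,
        List.map_map, Function.comp_def, List.getD_cons_succ, ← ih] <;> rfl

lemma findSome_range_getD {α : Type} (l : List (α × Bool)) (d : α × Bool) :
    (List.range l.length).findSome? (fun i => if (l.getD i d).2 then some (l.getD i d).1 else none) =
      ((l.filter (·.2)).map (·.1)).head? := by
  induction l with
  | nil => simp
  | cons x t ih =>
    obtain ⟨xv, xb⟩ := x
    rw [List.length_cons, List.range_succ_eq_map, List.findSome?_cons, List.findSome?_map]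
    simp only [List.getD_cons_zero, Function.comp_def, Nat.succ_eq_add_one, List.getD_cons_succ]
    cases xb
    · rw [List.filter_cons_of_neg (by simp)]
      simpa only [Bool.false_eq_true, if_false] using ih
    · rw [List.filter_cons_of_pos (by simp)]
      simp only [if_true, List.map_cons, List.head?_cons]

lemma noofelementA_eq (a : List (Int × Bool)) : noofelementA a = (kcnt a : Int) := by
  unfold noofelementA kcnt
  rw [countP_range_getD a (0, false) (·.2), List.countP_eq_length_filter]

lemma getSingleValueA_eq (a : List (Int × Bool)) :
    getSingleValueA a = (aliveVals a).head? := by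
  unfold getSingleValueA aliveVals
  exact findSome_range_getD a (0, false)

lemma aliveVals_length (a : List (Int × Bool)) : (aliveVals a).length = kcnt a := by
  simp [aliveVals, kcnt]

lemma rotIdx_zero (len : Nat) : rotIdx len 0 = List.range len := by simp [rotIdx]

lemma rotIdx_length (len c : Nat) (hc : c ≤ len) : (rotIdx len c).length = len := by
  simp [rotIdx]; omega

lemma rotIdx_cons (len c : Nat) (hc : c < len) :
    rotIdx len c = c :: ((List.range len).drop (c + 1) ++ (List.range len).take c) := by
  unfold rotIdx
  rw [List.drop_eq_getElem_cons (by simpa using hc)]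
  simp

lemma rotIdx_nxt (len c : Nat) (hc : c < len) :
    rotIdx len (nxt len c) = ((List.range len).drop (c + 1) ++ (List.range len).take c) ++ [c] := by
  unfold nxt
  have htake : (List.range len).take (c + 1) = (List.range len).take c ++ [c] := by
    rw [List.take_succ]
    simp [hc]
  split
  · rename_i h
    have hc1 : c + 1 = len := by omega
    unfold rotIdx
    rw [List.drop_zero, List.take_zero, List.append_nil]
    rw [show (List.range len).drop (c + 1) = [] by simp [hc1]]
    rw [List.nil_append, ← htake, hc1]
    simp
  · unfold rotIdx
    rw [htake, List.append_assoc]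

lemma rotIdx_perm (len c : Nat) : (rotIdx len c).Perm (List.range len) := by
  unfold rotIdx
  have h1 : ((List.range len).drop c ++ (List.range len).take c).Perm
      ((List.range len).take c ++ (List.range len).drop c) := List.perm_append_comm
  rwa [List.take_append_drop] at h1

lemma alivesFrom_length (a : List (Int × Bool)) (c : Nat) :
    (alivesFrom a c).length = kcnt a := by
  unfold alivesFrom kcnt
  rw [← List.countP_eq_length_filter, ← List.countP_eq_length_filter,
    (rotIdx_perm a.length c).countP_eq]
  exact countP_range_getD a (0, false) (·.2)

lemma distA_lt (a : List (Int × Bool)) (c : Nat) (hc : c ≤ a.length) (hk : 1 ≤ kcnt a) :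
    distA a c < a.length := by
  by_contra h
  push_neg at h
  have hlen := rotIdx_length a.length c hc
  have hle : distA a c ≤ (rotIdx a.length c).length := (List.takeWhile_prefix _).length_le
  have heq : distA a c = (rotIdx a.length c).length := by rw [hlen]; omega
  have hpre := List.takeWhile_prefix (p := fun j => !(alv a j)) (l := rotIdx a.length c)
  have hsame := hpre.eq_of_length heq
  have hall : ∀ x ∈ rotIdx a.length c, alv a x = false := by
    intro x hx
    rw [← hsame] at hx
    have := List.mem_takeWhile_imp hx
    simpa using this
  have h0 : alivesFrom a c = [] := by
    unfold alivesFrom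
    rw [List.filter_eq_nil_iff]
    intro x hx; simp [hall x hx]
  have hlf := alivesFrom_length a c
  rw [h0] at hlf
  simp only [List.length_nil] at hlf
  omega

lemma alivesFrom_dead (a : List (Int × Bool)) (c : Nat) (hc : c < a.length)
    (hal : alv a c = false) : alivesFrom a (nxt a.length c) = alivesFrom a c := by
  unfold alivesFrom
  rw [rotIdx_cons _ _ hc, rotIdx_nxt _ _ hc]
  simp [List.filter_append, List.filter_cons, hal]

lemma alivesFrom_alive (a : List (Int × Bool)) (c : Nat) (hc : c < a.length)
    (hal : alv a c = true) :
    ∃ F, alivesFrom a c = c :: F ∧ alivesFrom a (nxt a.length c) = F ++ [c] := by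
  refine ⟨(((List.range a.length).drop (c + 1) ++ (List.range a.length).take c)).filter (alv a), ?_, ?_⟩
  · unfold alivesFrom
    rw [rotIdx_cons _ _ hc, List.filter_cons]
    simp [hal]
  · unfold alivesFrom
    rw [rotIdx_nxt _ _ hc]
    simp [List.filter_append, List.filter_cons, hal]

lemma distA_alive (a : List (Int × Bool)) (c : Nat) (hc : c < a.length)
    (hal : alv a c = true) : distA a c = 0 := by
  unfold distA
  rw [rotIdx_cons _ _ hc, List.takeWhile_cons]
  simp [hal]

lemma distA_dead (a : List (Int × Bool)) (c : Nat) (hc : c < a.length)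
    (hal : alv a c = false) (hk : 1 ≤ kcnt a) :
    distA a c = distA a (nxt a.length c) + 1 := by
  have hR : ∃ x ∈ ((List.range a.length).drop (c + 1) ++ (List.range a.length).take c), alv a x = true := by
    by_contra hno
    push_neg at hno
    have h0 : alivesFrom a c = [] := by
      unfold alivesFrom
      rw [rotIdx_cons _ _ hc, List.filter_cons]
      simp only [hal, Bool.false_eq_true, if_false]
      rw [List.filter_eq_nil_iff]
      intro x hx
      simp [hno x hx]
    have hlf := alivesFrom_length a c
    rw [h0] at hlf
    simp only [List.length_nil] at hlf
    omega
  unfold distA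
  rw [rotIdx_cons _ _ hc, rotIdx_nxt _ _ hc]
  obtain ⟨x, hx, hxal⟩ := hR
  generalize hRg : (List.range a.length).drop (c + 1) ++ (List.range a.length).take c = R at hx ⊢
  rw [List.takeWhile_cons]
  have hne : (R.takeWhile (fun j => !(alv a j))).length ≠ R.length := by
    intro he
    have hsame := (List.takeWhile_prefix (p := fun j => !(alv a j)) (l := R)).eq_of_length he
    rw [← hsame] at hx
    have := List.mem_takeWhile_imp hx
    simp [hxal] at this
  rw [List.takeWhile_append, if_neg hne]
  simp [hal]

lemma cyclic_getD (cv : Nat) (L : List Nat) (t : Nat) (ht : 1 ≤ t) :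
    (cv :: L).getD (t % (L.length + 1)) 0 = (L ++ [cv]).getD ((t - 1) % (L.length + 1)) 0 := by
  have hk : 0 < L.length + 1 := Nat.succ_pos _
  rw [mod_pred t (L.length + 1) hk ht]
  by_cases h0 : t % (L.length + 1) = 0
  · rw [if_pos h0, h0]
    simp only [List.getD_cons_zero, Nat.add_sub_cancel]
    rw [List.getD_eq_getElem _ _ (by simp)]
    simp
  · rw [if_neg h0]
    have hslt' : t % (L.length + 1) < L.length + 1 := Nat.mod_lt _ hk
    obtain ⟨s, hseq⟩ : ∃ s, t % (L.length + 1) = s + 1 := ⟨t % (L.length + 1) - 1, by omega⟩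
    rw [hseq]
    simp only [List.getD_cons_succ, Nat.add_sub_cancel]
    have hslt : s < L.length := by omega
    rw [List.getD_eq_getElem _ _ hslt, List.getD_eq_getElem _ _ (by simp; omega)]
    rw [List.getElem_append_left hslt]

lemma innerA_of_ge (m : Int) (fuel : Nat) (a : List (Int × Bool)) (c i : Int) (h : m ≤ i) :
    innerA m fuel a c i = a := by
  cases fuel with
  | zero => rfl
  | succ f => rw [innerA, if_neg (by omega)]

-- the inner while loop marks dead exactly the (t mod k)-th alive element of the cyclic scan from c
lemma innerA_spec (m : Int) (hm : 1 ≤ m) :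
    ∀ (fuel t : Nat) (a : List (Int × Bool)) (c : Nat) (i : Int),
      0 ≤ i → m - 1 - i = (t : Int) →
      c < a.length → 1 ≤ kcnt a →
      t * a.length + distA a c + 1 ≤ fuel →
      innerA m fuel a (c : Int) i =
        a.set ((alivesFrom a c).getD (t % kcnt a) 0)
          ((a.getD ((alivesFrom a c).getD (t % kcnt a) 0) (0, false)).1, false) := by
  intro fuel
  induction fuel with
  | zero => intro t a c i _ _ _ _ hf; omega
  | succ f ih =>
    intro t a c i h0 ht hc hk hf
    have hi : i < m := by omega
    have hgd : PySem.List.pyGetD a ((c : Nat) : Int) ((0 : Int), false) = a.getD c ((0 : Int), false) :=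
      PySem.List.pyGetD_natCast a c _
    have hnxtlt : nxt a.length c < a.length := by unfold nxt; split <;> omega
    have hnxtc : (if ((c : Int) + 1 ≥ ((a.length : Nat) : Int)) then (0 : Int) else (c : Int) + 1) = ((nxt a.length c : Nat) : Int) := by
      unfold nxt
      split <;> split <;> push_cast <;> omega
    rw [innerA, if_pos hi]
    cases hal : alv a c with
    | false =>
      have hb : (!(PySem.List.pyGetD a ((c : Nat) : Int) ((0 : Int), false)).2) = true := by
        rw [hgd]; unfold alv at hal; rw [hal]; rfl
      rw [if_pos hb, hnxtc]
      rw [ih t a (nxt a.length c) i h0 ht hnxtlt hk (by have := distA_dead a c hc hal hk; omega)]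
      rw [alivesFrom_dead a c hc hal]
    | true =>
      have hb : ¬ ((!(PySem.List.pyGetD a ((c : Nat) : Int) ((0 : Int), false)).2) = true) := by
        rw [hgd]; unfold alv at hal; rw [hal]; simp
      rw [if_neg hb]
      obtain ⟨F, hF1, hF2⟩ := alivesFrom_alive a c hc hal
      have hkF : kcnt a = F.length + 1 := by
        have hl := alivesFrom_length a c
        rw [hF1] at hl
        simpa using hl.symm
      by_cases him : i = m - 1
      · have ht0 : t = 0 := by omega
        have hbeq : (i == m - 1) = true := by simp [him]
        simp only [hbeq, if_true]
        rw [PySem.List.pySetD_natCast, hgd]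
        rw [innerA_of_ge _ _ _ _ _ (by omega)]
        rw [ht0, hF1]
        simp only [Nat.zero_mod, List.getD_cons_zero]
      · have ht1 : 1 ≤ t := by omega
        have hbeq : (i == m - 1) = false := by simp [him]
        simp only [hbeq, Bool.false_eq_true, if_false]
        rw [hnxtc]
        rw [ih (t - 1) a (nxt a.length c) (i + 1) (by omega) (by push_cast; omega) hnxtlt hk ?_]
        · have hidx : (alivesFrom a (nxt a.length c)).getD ((t - 1) % kcnt a) 0 =
              (alivesFrom a c).getD (t % kcnt a) 0 := by
            rw [hF1, hF2, hkF]
            exact (cyclic_getD c F t ht1).symm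
          rw [hidx]
        · have hd0 : distA a c = 0 := distA_alive a c hc hal
          have hdn : distA a (nxt a.length c) < a.length := distA_lt a (nxt a.length c) (by omega) hk
          have hmul : t * a.length = (t - 1) * a.length + a.length := by
            obtain ⟨s, rfl⟩ : ∃ s, t = s + 1 := ⟨t - 1, by omega⟩
            simp [Nat.succ_mul]
          omega

lemma pos_cons (x : Int × Bool) (a : List (Int × Bool)) :
    alivesFrom (x :: a) 0 =
      if x.2 then 0 :: (alivesFrom a 0).map (· + 1) else (alivesFrom a 0).map (· + 1) := by
  unfold alivesFrom
  rw [rotIdx_zero, rotIdx_zero, List.length_cons, List.range_succ_eq_map, List.filter_cons,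
    List.filter_map]
  have hcomp : (alv (x :: a)) ∘ Nat.succ = alv a := by
    funext i; simp [alv]
  rw [hcomp]
  have halv0 : alv (x :: a) 0 = x.2 := by simp [alv]
  cases hx : x.2 <;> simp [halv0, hx]

-- killing the r-th alive element erases index r from the alive values and keeps all first components
lemma kill_eraseIdx (a : List (Int × Bool)) (r : Nat) (hr : r < kcnt a) :
    aliveVals (a.set ((alivesFrom a 0).getD r 0)
        ((a.getD ((alivesFrom a 0).getD r 0) (0, false)).1, false)) = (aliveVals a).eraseIdx r ∧
    (a.set ((alivesFrom a 0).getD r 0)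
        ((a.getD ((alivesFrom a 0).getD r 0) (0, false)).1, false)).map (·.1) = a.map (·.1) := by
  induction a generalizing r with
  | nil => simp [kcnt] at hr
  | cons x t ih =>
    have hlen : (alivesFrom t 0).length = kcnt t := alivesFrom_length t 0
    rw [pos_cons]
    cases hx : x.2
    · have hk : kcnt (x :: t) = kcnt t := by simp [kcnt, List.filter_cons, hx]
      rw [hk] at hr
      have hget : ((alivesFrom t 0).map (· + 1)).getD r 0 = (alivesFrom t 0).getD r 0 + 1 := by
        rw [List.getD_eq_getElem _ _ (by simpa [hlen] using hr),
            List.getD_eq_getElem _ _ (by simpa [hlen] using hr)]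
        simp
      simp only [hx, Bool.false_eq_true, if_false, hget, List.getD_cons_succ, List.set_cons_succ]
      have hv : aliveVals (x :: (t.set ((alivesFrom t 0).getD r 0)
          ((t.getD ((alivesFrom t 0).getD r 0) (0, false)).1, false))) =
          aliveVals (t.set ((alivesFrom t 0).getD r 0)
          ((t.getD ((alivesFrom t 0).getD r 0) (0, false)).1, false)) := by
        simp [aliveVals, hx]
      have hv2 : aliveVals (x :: t) = aliveVals t := by simp [aliveVals, hx]
      rw [hv, hv2, (ih r hr).1]
      refine ⟨rfl, ?_⟩
      simp only [List.map_cons]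
      rw [(ih r hr).2]
    · have hk : kcnt (x :: t) = kcnt t + 1 := by simp [kcnt, List.filter_cons, hx]
      have hv2 : aliveVals (x :: t) = x.1 :: aliveVals t := by
        simp [aliveVals, hx]
      cases r with
      | zero =>
        rw [if_pos rfl]
        simp only [List.getD_cons_zero, List.set_cons_zero]
        constructor
        · simp [aliveVals, hx, hv2]
        · simp
      | succ r' =>
        rw [hk] at hr
        have hr' : r' < kcnt t := by omega
        have hget : (0 :: (alivesFrom t 0).map (· + 1)).getD (r' + 1) 0 =
            (alivesFrom t 0).getD r' 0 + 1 := by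
          rw [List.getD_cons_succ,
            List.getD_eq_getElem _ _ (by simpa [hlen] using hr'),
            List.getD_eq_getElem _ _ (by simpa [hlen] using hr')]
          simp
        rw [if_pos rfl]
        simp only [hget, List.getD_cons_succ, List.set_cons_succ]
        have hv : aliveVals (x :: (t.set ((alivesFrom t 0).getD r' 0)
            ((t.getD ((alivesFrom t 0).getD r' 0) (0, false)).1, false))) =
            x.1 :: aliveVals (t.set ((alivesFrom t 0).getD r' 0)
            ((t.getD ((alivesFrom t 0).getD r' 0) (0, false)).1, false)) := by
          simp [aliveVals, hx]
        rw [hv, hv2, (ih r' hr').1, List.eraseIdx_cons_succ]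
        refine ⟨rfl, ?_⟩
        simp only [List.map_cons]
        rw [(ih r' hr').2]

lemma outerA_stall (m : Int) (fuel : Nat) (a : List (Int × Bool)) (hk : kcnt a ≤ 1) :
    outerA m fuel a = a := by
  cases fuel with
  | zero => rfl
  | succ f => rw [outerA, if_neg (by rw [noofelementA_eq]; omega)]

lemma altLoopB_stall (m : Int) (l : List Int) (hl : l.length ≤ 1) : altLoopB m l = l := by
  rw [altLoopB, if_neg (by omega)]

lemma altLoopB_step (m : Int) (l : List Int) (hl : 1 < l.length) (r : Nat)
    (hr : PySem.Int.mod (m - 1) (l.length : Int) = (r : Int)) (hrlt : r < l.length) :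
    altLoopB m l = altLoopB m (l.eraseIdx r) := by
  rw [altLoopB, if_pos hl]
  split
  · rename_i p heq
    rw [hr, PySem.List.pop?_natCast l r hrlt] at heq
    obtain rfl : p = (l[r], l.eraseIdx r) := (Option.some.inj heq).symm
    rfl
  · rename_i heq
    rw [hr, PySem.List.pop?_natCast l r hrlt] at heq
    cases heq

lemma outerA_spec (m : Int) (hm : 1 ≤ m) :
    ∀ (fuel : Nat) (a : List (Int × Bool)), kcnt a ≤ fuel + 1 →
      aliveVals (outerA m fuel a) = altLoopB m (aliveVals a) ∧
      (outerA m fuel a).map (·.1) = a.map (·.1) := by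
  intro fuel
  induction fuel with
  | zero =>
    intro a hk
    rw [outerA]
    exact ⟨(altLoopB_stall m _ (by rw [aliveVals_length]; omega)).symm, rfl⟩
  | succ f ih =>
    intro a hk
    by_cases hg : 1 < kcnt a
    · rw [outerA, if_pos (by rw [noofelementA_eq]; exact_mod_cast hg)]
      have hkle : kcnt a ≤ a.length := List.length_filter_le _ _
      have hlen2 : 2 ≤ a.length := by omega
      have hfuel : (m - 1).toNat * a.length + distA a 0 + 1 ≤ (m.toNat + 1) * (a.length + 1) := by
        have h1 : (m - 1).toNat * a.length ≤ m.toNat * a.length :=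
          Nat.mul_le_mul_right _ (by omega)
        have h2 := distA_lt a 0 (by omega) (by omega)
        have hexp : (m.toNat + 1) * (a.length + 1) = m.toNat * a.length + m.toNat + a.length + 1 := by
          ring
        omega
      have hinner := innerA_spec m hm ((m.toNat + 1) * (a.length + 1)) (m - 1).toNat a 0 0
        (le_refl 0) (by omega) (by omega) (by omega) hfuel
      rw [show (((0 : Nat)) : Int) = (0 : Int) from rfl] at hinner
      rw [hinner]
      have hrk : (m - 1).toNat % kcnt a < kcnt a := Nat.mod_lt _ (by omega)
      have hkill := kill_eraseIdx a ((m - 1).toNat % kcnt a) hrk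
      have hklen : (aliveVals a).length = kcnt a := aliveVals_length a
      have hkn : kcnt (a.set ((alivesFrom a 0).getD ((m - 1).toNat % kcnt a) 0)
          ((a.getD ((alivesFrom a 0).getD ((m - 1).toNat % kcnt a) 0) (0, false)).1, false)) =
          kcnt a - 1 := by
        rw [← aliveVals_length, hkill.1, List.length_eraseIdx_of_lt (by omega), hklen]
      have hih := ih (a.set ((alivesFrom a 0).getD ((m - 1).toNat % kcnt a) 0)
        ((a.getD ((alivesFrom a 0).getD ((m - 1).toNat % kcnt a) 0) (0, false)).1, false))
        (by rw [hkn]; omega)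
      refine ⟨?_, ?_⟩
      · rw [hih.1, hkill.1]
        have hidx : PySem.Int.mod (m - 1) ((aliveVals a).length : Int) =
            (((m - 1).toNat % kcnt a : Nat) : Int) := by
          rw [hklen]
          have hm1 : m - 1 = (((m - 1).toNat : Nat) : Int) := by omega
          rw [hm1, PySem.Int.mod_natCast]
          simp
        have hstep := altLoopB_step m (aliveVals a) (by omega) ((m - 1).toNat % kcnt a)
          hidx (by omega)
        rw [hstep]
      · rw [hih.2, hkill.2]
    · rw [outerA, if_neg (by rw [noofelementA_eq]; omega)]
      exact ⟨(altLoopB_stall m _ (by rw [aliveVals_length]; omega)).symm, rfl⟩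

lemma range_getD_take {α : Type} (l : List α) (d : α) (n' : Nat) (h : n' ≤ l.length) :
    (List.range n').map (fun k => l.getD k d) = l.take n' := by
  apply List.ext_getElem
  · simp [h]
  · intro i h1 h2
    simp only [List.getElem_map, List.getElem_range, List.getElem_take]
    rw [List.getD_eq_getElem _ _ (by simp at h1; omega)]

-- the initial array [[array[i], True] for i in range(n)] under Pre_
lemma init_eq (n : Int) (array : List Int) (hn0 : 0 ≤ n) (hnle : n ≤ array.length) :
    (PySem.List.pyRange 0 n 1).map (fun i => (PySem.List.pyGetD array i 0, true)) =
      (array.take n.toNat).map (fun v => (v, true)) := by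
  rw [PySem.List.pyRange_one]
  rw [List.map_map]
  have hfun : ((fun i => (PySem.List.pyGetD array i 0, true)) ∘ fun k : Nat => (0 : Int) + ↑k) =
      fun k : Nat => (array.getD k 0, true) := by
    funext k
    simp [PySem.List.pyGetD_natCast]
  rw [hfun]
  have : (fun k : Nat => (array.getD k 0, true)) =
      (fun v : Int => (v, true)) ∘ fun k : Nat => array.getD k 0 := rfl
  rw [this, ← List.map_map, show n - 0 = n from by ring,
    range_getD_take array 0 n.toNat (by omega)]

lemma aliveVals_pairs (E : List Int) : aliveVals (E.map (fun v => (v, true))) = E := by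
  induction E with
  | nil => rfl
  | cons x t ih => simpa [aliveVals] using ih

lemma kcnt_pairs (E : List Int) : kcnt (E.map (fun v => (v, true))) = E.length := by
  rw [← aliveVals_length, aliveVals_pairs]

lemma mapfst_pairs (E : List Int) : (E.map (fun v => (v, true))).map (·.1) = E := by
  induction E with
  | nil => rfl
  | cons x t ih => simpa using ih

lemma filter_fst {q : Int → Bool} (l : List (Int × Bool)) :
    (l.filter (fun x => q x.1)).map (·.1) = (l.map (·.1)).filter q := by
  rw [List.filter_map]
  rfl

lemma head_getD (l : List Int) : l.head?.getD 0 = l.getD 0 0 := by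
  cases l <;> rfl

lemma main_eq (n : Int) (array : List Int) (m : Int)
    (hpre : Pre_select_and_filter_numbers n array m) :
    select_and_filter_numbers n array m = select_and_filter_numbers_alt n array m := by
  obtain ⟨hn1, hnle, hmor⟩ := hpre
  simp only [select_and_filter_numbers, select_and_filter_numbers_alt]
  rw [init_eq n array (by omega) hnle, PySem.List.slice_to array (by omega)]
  have hlenE : (array.take n.toNat).length = n.toNat := by
    rw [List.length_take]; omega
  have hlena : ((array.take n.toNat).map (fun v => (v, true))).length = n.toNat := by
    rw [List.length_map, hlenE]
  have houter : aliveVals (outerA m ((array.take n.toNat).map (fun v => (v, true))).length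
        ((array.take n.toNat).map (fun v => (v, true)))) =
        altLoopB m (array.take n.toNat) ∧
      (outerA m ((array.take n.toNat).map (fun v => (v, true))).length
        ((array.take n.toNat).map (fun v => (v, true)))).map (·.1) = array.take n.toNat := by
    rcases hmor with hm | hne1
    · have := outerA_spec m hm ((array.take n.toNat).map (fun v => (v, true))).length
        ((array.take n.toNat).map (fun v => (v, true)))
        (by rw [kcnt_pairs, hlenE, hlena]; omega)
      rwa [aliveVals_pairs, mapfst_pairs] at this
    · have hstall := outerA_stall m ((array.take n.toNat).map (fun v => (v, true))).length
        ((array.take n.toNat).map (fun v => (v, true))) (by rw [kcnt_pairs, hlenE, hne1]; rfl)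
      rw [hstall, aliveVals_pairs, mapfst_pairs,
        altLoopB_stall m _ (by rw [hlenE, hne1]; rfl)]
      exact ⟨rfl, rfl⟩
  have hcheck : (getSingleValueA (outerA m ((array.take n.toNat).map (fun v => (v, true))).length
        ((array.take n.toNat).map (fun v => (v, true))))).getD 0 =
      PySem.List.pyGetD (altLoopB m (array.take n.toNat)) 0 0 := by
    rw [getSingleValueA_eq, houter.1, PySem.List.pyGetD_zero, head_getD]
  rw [hcheck]
  have hEO : ∀ q : Int → Bool,
      ((List.range (outerA m ((array.take n.toNat).map (fun v => (v, true))).length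
          ((array.take n.toNat).map (fun v => (v, true)))).length).filter
        (fun i => q ((outerA m ((array.take n.toNat).map (fun v => (v, true))).length
          ((array.take n.toNat).map (fun v => (v, true)))).getD i (0, false)).1)).map
        (fun i => ((outerA m ((array.take n.toNat).map (fun v => (v, true))).length
          ((array.take n.toNat).map (fun v => (v, true)))).getD i (0, false)).1) =
      (array.take n.toNat).filter q := by
    intro q
    rw [filter_map_range_getD _ (0, false) (fun x => q x.1) (fun x => x.1), filter_fst, houter.2]
  rcases PySem.Int.mod_two_eq (PySem.List.pyGetD (altLoopB m (array.take n.toNat)) 0 0) with h | h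
  · rw [if_pos (by rw [h]; rfl)]
    unfold getEvenA
    rw [hEO (fun v => PySem.Int.mod v 2 == 0), h]
  · rw [if_neg (by rw [h]; simp)]
    unfold getOddA
    rw [hEO (fun v => !(PySem.Int.mod v 2 == 0)), h]
    congr 1
    apply List.filter_congr
    intro x _
    rcases PySem.Int.mod_two_eq x with hx | hx <;> rw [hx] <;> rfl

-- ===== VERDICT (by name: the statement is the Claim_ definition above) =====
theorem select_and_filter_numbers_spec : Claim_equal_select_and_filter_numbers := by
  intro n array m _ hpre
  exact main_eq n array m hpre
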